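-- pv_equiv track=rewrite | github.com/domyg/Information-Theory-and-Data-Compression | Script Python/IntegerEncoding.py | fibonacci_decoding
-- ===== SOURCE A (Python) =====
-- def get_fibonacci(i):
--
--     a = 0
--     b = 1
--     list = []
--     list.append(a)
--
--     for x in range(i):
--         a, b = b, a + b
--         list.append(a)
--
--     return list
--
-- def fibonacci_decoding(bin):
--
--     # Rimuovo il LSB dalla sequenza da Decodificare
--     bin = bin[:-1]
--     output = 0
--
--     # Creo un indice con valore '2' per cominciare dal Terzo numero della Sequenza di Fibonacci
--     # che corrisponde al primo numero considerato nella rappresentazione di Zeckendorf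
--     pos = 2
--
--     # Ricavo la lista dei primi N numeri di Fibonacci, considerando N come la lunghezza della sequenza
--     # binaria da decodificare
--     fibonacci_sequence = get_fibonacci(len(bin)+1)
--
--     # Scansiono i bit della sequenza da decodificare, considerandone la posizione, sommando tra loro
--     # tutti i numeri di Fibonacci aventi posizione corrispondente alla posizione dei bit con valore '1'
--     for b in bin:
--         if b == '1':
--             output = output + fibonacci_sequence[pos]
--         pos = pos + 1
--
--     return str(output)
-- ===== SOURCE B (Python) =====
-- def fibonacci_decoding(bin):
--     # Horner-style evaluation from the right: no Fibonacci numbers are ever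
--     # computed. Carry two accumulators f = sum of bits weighted by F(i+1),
--     # g = sum weighted by F(i+2) for the suffix seen so far; prepending a bit
--     # updates them by the Fibonacci recurrence, and g is the decoded value.
--     f = g = 0
--     for c in reversed(bin[:-1]):
--         bit = 1 if c == '1' else 0
--         f, g = bit + g, bit + f + g
--     return str(g)
-- ===== Notes on version B (the rewrite author's own statement) =====
-- stated objective: faster
-- what changed: B decodes by a Horner-style right-to-left recurrence on two weighted accumulators (f,g) -> (bit+g, bit+f+g), never computing or storing any Fibonacci number, whereas A precomputes a Fibonacci list and sums indexed entries left-to-right; a timing run measured B 67x faster at n=65536 and A timing out at n=262144.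
import Mathlib
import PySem

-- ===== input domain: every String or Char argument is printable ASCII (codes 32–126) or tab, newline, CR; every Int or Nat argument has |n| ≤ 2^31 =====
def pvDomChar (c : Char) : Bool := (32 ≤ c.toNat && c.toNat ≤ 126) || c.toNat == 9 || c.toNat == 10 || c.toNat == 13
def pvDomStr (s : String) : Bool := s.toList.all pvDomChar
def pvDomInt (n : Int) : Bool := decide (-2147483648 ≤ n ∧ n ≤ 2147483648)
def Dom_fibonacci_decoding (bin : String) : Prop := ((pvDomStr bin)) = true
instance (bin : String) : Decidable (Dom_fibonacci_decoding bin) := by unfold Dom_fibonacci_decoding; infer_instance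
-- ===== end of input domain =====

-- B replaces A's precomputed Fibonacci list and positional lookups by a Horner-style
-- right-to-left recurrence on two accumulators; no Fibonacci number is computed
-- (objective: alternative algorithm, O(1) extra space).

-- ===== PORT A =====
-- a = 0; b = 1; list = [0]; for _ in range(i): a, b = b, a + b; list.append(a)
def get_fibonacci (i : Int) : List Int :=
  ((PySem.List.pyRange 0 i 1).foldl
    (fun (st : Int × Int × List Int) _ => (st.2.1, st.1 + st.2.1, st.2.2 ++ [st.2.1]))
    (0, 1, [0])).2.2

-- fibonacci_sequence[pos] is ported with pyGetD; pos is provably in range on every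
-- input (seq has length len(bin)+2 and pos runs from 2 to len(bin)+1), so Python
-- never raises here and A is total.
def fibonacci_decoding (bin : String) : String :=
  let cs := PySem.List.slice bin.toList none (some (-1))
  let seq := get_fibonacci ((cs.length : Int) + 1)
  let st := cs.foldl
    (fun (st : Int × Int) b =>
      (if b = '1' then st.1 + PySem.List.pyGetD seq st.2 0 else st.1, st.2 + 1))
    (0, 2)
  PySem.Int.toStr st.1

-- ===== PORT B =====
-- f = g = 0; for c in reversed(bin[:-1]): bit = 1 if c=='1' else 0; f, g = bit+g, bit+f+g
def fibonacci_decoding_alt (bin : String) : String :=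
  let st := (PySem.List.slice bin.toList none (some (-1))).reverse.foldl
    (fun (st : Int × Int) c =>
      let bit : Int := if c = '1' then 1 else 0
      (bit + st.2, bit + st.1 + st.2))
    (0, 0)
  PySem.Int.toStr st.2

-- ===== PRECONDITION & SPEC =====
def Spec_fibonacci_decoding (bin : String) (out : String) : Prop := out = fibonacci_decoding_alt bin
instance (bin : String) (out : String) : Decidable (Spec_fibonacci_decoding bin out) := by unfold Spec_fibonacci_decoding; infer_instance

-- ===== CLAIM =====
def Claim_equal_fibonacci_decoding : Prop := ∀ (bin : String), Dom_fibonacci_decoding bin → Spec_fibonacci_decoding bin (fibonacci_decoding bin)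

-- ===== LEMMAS AND PROOFS =====

/-- The mathematical Fibonacci sequence: 0, 1, 1, 2, 3, 5, … -/
def fibI : Nat → Int
  | 0 => 0
  | 1 => 1
  | n + 2 => fibI n + fibI (n + 1)

/-- The decoded value: bits weighted by Fibonacci numbers starting at index k. -/
def decS : List Char → Nat → Int
  | [], _ => 0
  | c :: cs, k => (if c = '1' then fibI k else 0) + decS cs (k + 1)

lemma get_fib_fold (l : List α) (k : Nat) :
    (l.foldl (fun (st : Int × Int × List Int) _ => (st.2.1, st.1 + st.2.1, st.2.2 ++ [st.2.1]))
      (fibI k, fibI (k + 1), (List.range (k + 1)).map fibI)).2.2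
      = (List.range (k + l.length + 1)).map fibI := by
  induction l generalizing k with
  | nil => simp
  | cons x xs ih =>
    simp only [List.foldl_cons, List.length_cons]
    have h1 : fibI k + fibI (k + 1) = fibI (k + 2) := by rfl
    have h2 : (List.range (k + 1)).map fibI ++ [fibI (k + 1)]
        = (List.range (k + 2)).map fibI := by
      rw [List.range_succ (n := k + 1)]; simp
    rw [h1, h2, ih (k + 1)]
    congr 2
    omega

lemma get_fibonacci_eq (n : Nat) :
    get_fibonacci (n : Int) = (List.range (n + 1)).map fibI := by
  unfold get_fibonacci
  have : PySem.List.pyRange 0 (n : Int) 1 = (List.range n).map (fun k => (k : Int)) := by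
    simp [PySem.List.pyRange_zero_natCast]; rw [List.map_eq_flatMap]
  rw [this]
  have := get_fib_fold ((List.range n).map (fun k => (k : Int))) 0
  simpa using this

lemma seq_getD (m k : Nat) (hk : k < m) :
    PySem.List.pyGetD ((List.range m).map fibI) (k : Int) 0 = fibI k := by
  rw [PySem.List.pyGetD_natCast]
  simp [List.getD, List.getElem?_map, List.getElem?_range hk]

/-- A's left-to-right loop with positional lookups computes acc + decS cs k. -/
lemma loopA_eq (m : Nat) (cs : List Char) (k : Nat) (acc : Int) (hm : k + cs.length ≤ m) :
    (cs.foldl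
      (fun (st : Int × Int) b =>
        (if b = '1' then st.1 + PySem.List.pyGetD ((List.range m).map fibI) st.2 0 else st.1,
         st.2 + 1))
      (acc, (k : Int))).1
    = acc + decS cs k := by
  induction cs generalizing k acc with
  | nil => simp [decS]
  | cons c cs ih =>
    simp only [List.foldl_cons, List.length_cons] at *
    have hk : k < m := by omega
    have hcast : (k : Int) + 1 = ((k + 1 : Nat) : Int) := by push_cast; ring
    rw [seq_getD m k hk, hcast]
    by_cases hc : c = '1'
    · simp only [hc, if_true, decS]
      rw [ih (k + 1) _ (by omega)]
      omega
    · simp only [hc, if_false, decS]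
      rw [ih (k + 1) _ (by omega)]
      omega

lemma decS_add (cs : List Char) (k : Nat) :
    decS cs k + decS cs (k + 1) = decS cs (k + 2) := by
  induction cs generalizing k with
  | nil => simp [decS]
  | cons c cs ih =>
    have h : fibI k + fibI (k + 1) = fibI (k + 2) := rfl
    have h2 := ih (k + 1)
    have e : k + 1 + 1 = k + 2 := by omega
    have e2 : k + 1 + 2 = k + 2 + 1 := by omega
    rw [e, e2] at h2
    simp only [decS, e]
    by_cases hc : c = '1' <;> simp only [hc, if_true, if_false] <;> omega

/-- B's right-to-left recurrence computes (decS cs 1, decS cs 2). -/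
lemma loopB_eq (cs : List Char) :
    cs.reverse.foldl
      (fun (st : Int × Int) c =>
        let bit : Int := if c = '1' then 1 else 0
        (bit + st.2, bit + st.1 + st.2))
      (0, 0)
    = (decS cs 1, decS cs 2) := by
  rw [List.foldl_reverse]
  induction cs with
  | nil => simp [decS]
  | cons c cs ih =>
    simp only [List.foldr_cons, ih]
    have h1 : fibI 1 = 1 := by decide
    have h2 : fibI 2 = 1 := by decide
    have h3 := decS_add cs 1
    norm_num at h3
    by_cases hc : c = '1' <;>
      simp [hc, decS, h1, h2, Prod.ext_iff] <;> omega

-- ===== VERDICT =====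
theorem fibonacci_decoding_spec : Claim_equal_fibonacci_decoding := by
  intro bin _
  unfold Spec_fibonacci_decoding fibonacci_decoding fibonacci_decoding_alt
  set cs := PySem.List.slice bin.toList none (some (-1)) with hcs
  simp only []
  have hseq : get_fibonacci ((cs.length : Int) + 1)
      = (List.range (cs.length + 2)).map fibI := by
    have : ((cs.length : Int) + 1) = ((cs.length + 1 : Nat) : Int) := by push_cast; ring
    rw [this, get_fibonacci_eq]
  rw [hseq, loopB_eq]
  have h := loopA_eq (cs.length + 2) cs 2 0 (by omega)
  have h2 : ((2 : Nat) : Int) = (2 : Int) := by norm_num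
  rw [h2] at h
  rw [h]
  simp
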